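-- pv_equiv track=rewrite | github.com/Dharma-Sagar/bo-sentify | sentify/sentence_versions.py | get_sentences_after
-- ===== SOURCE A (Python) =====
-- def get_sentences_after(props, length):
--     if length == len(props):
--         return props[length-1]
--     else:
--         subprops = get_sentences_after(props, length + 1)
--         res = []
--         for thisprop in props[length-1]:
--             for thissubprop in subprops:
--                 res.append(thisprop + ' ' + thissubprop)
--         return res
-- ===== SOURCE B (Python) =====
-- def get_sentences_after(props, length):
--     result = props[length - 1]
--     for i in range(length, len(props)):
--         result = [a + ' ' + b for a in result for b in props[i]]
--     return result
-- ===== Notes on version B (the rewrite author's own statement) =====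
-- stated objective: simpler
-- what changed: Replaces the recursion (one stack frame per sublist, product built right-to-left) with a single left-to-right fold: start from props[length-1] and fold each later sublist in with a flat list comprehension.
import Mathlib
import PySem

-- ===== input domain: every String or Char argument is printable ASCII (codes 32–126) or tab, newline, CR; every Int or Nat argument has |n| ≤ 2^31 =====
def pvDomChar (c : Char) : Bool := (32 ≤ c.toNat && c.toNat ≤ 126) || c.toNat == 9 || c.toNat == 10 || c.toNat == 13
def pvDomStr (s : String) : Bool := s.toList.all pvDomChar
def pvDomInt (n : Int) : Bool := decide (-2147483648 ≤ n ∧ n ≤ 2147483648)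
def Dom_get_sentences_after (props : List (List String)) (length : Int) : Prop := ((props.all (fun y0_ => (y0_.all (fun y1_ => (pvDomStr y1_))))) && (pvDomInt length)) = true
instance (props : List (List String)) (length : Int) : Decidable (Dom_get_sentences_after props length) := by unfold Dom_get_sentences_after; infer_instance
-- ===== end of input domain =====

-- B replaces A's recursion by a single left-to-right fold over the remaining sublists (simpler; same cost).

-- ===== PORT A =====
-- A recurses with length+1 until length == len(props); fuel = (len(props)-length).toNat makes the
-- Lean recursion total (fuel runs out exactly where Python A diverges, outside Pre_).
def get_sentences_after_go (props : List (List String)) : Nat → Int → List String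
  | 0, length =>
    if length = (props.length : Int) then (PySem.List.pyGet? props (length - 1)).getD []
    else []  -- fuel exhausted: Python A never reaches this inside Pre_
  | fuel + 1, length =>
    if length = (props.length : Int) then (PySem.List.pyGet? props (length - 1)).getD []
    else
      let subprops := get_sentences_after_go props fuel (length + 1)
      ((PySem.List.pyGet? props (length - 1)).getD []).foldl
        (fun res thisprop =>
          subprops.foldl (fun res thissubprop => res ++ [thisprop ++ " " ++ thissubprop]) res)
        []

def get_sentences_after (props : List (List String)) (length : Int) : List String :=
  get_sentences_after_go props ((props.length : Int) - length).toNat length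

-- ===== PORT B =====
def get_sentences_after_alt (props : List (List String)) (length : Int) : List String :=
  (PySem.List.pyRange length (props.length : Int) 1).foldl
    (fun result i =>
      result.flatMap (fun a => ((PySem.List.pyGet? props i).getD []).map (fun b => a ++ " " ++ b)))
    ((PySem.List.pyGet? props (length - 1)).getD [])

-- ===== PRECONDITION & SPEC =====
-- Pre_ excludes exactly the inputs where Python A raises: length > len(props) (infinite recursion,
-- RecursionError) and length - 1 < -len(props) or props = [] (IndexError on props[length-1]).
def Pre_get_sentences_after (props : List (List String)) (length : Int) : Prop :=
  props ≠ [] ∧ 1 - (props.length : Int) ≤ length ∧ length ≤ (props.length : Int)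
instance (props : List (List String)) (length : Int) : Decidable (Pre_get_sentences_after props length) := by unfold Pre_get_sentences_after; infer_instance

def pvWitness_get_sentences_after : List (List String) × Int := ([["a", "b"], ["c"], ["d", "e"]], 1)

def Spec_get_sentences_after (props : List (List String)) (length : Int) (out : List String) : Prop := out = get_sentences_after_alt props length
instance (props : List (List String)) (length : Int) (out : List String) : Decidable (Spec_get_sentences_after props length out) := by unfold Spec_get_sentences_after; infer_instance

-- ===== CLAIM (what is proved, stated in full; the proofs are below) =====
def Claim_equal_get_sentences_after : Prop := ∀ (props : List (List String)) (length : Int), Dom_get_sentences_after props length → Pre_get_sentences_after props length → Spec_get_sentences_after props length (get_sentences_after props length)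

-- ===== LEMMAS AND PROOFS =====

-- the space-separated cartesian product both programs build
def pvProd (xs ys : List String) : List String :=
  xs.flatMap (fun a => ys.map (fun b => a ++ " " ++ b))

theorem pvProd_inner (ys : List String) (tp : String) (acc : List String) :
    ys.foldl (fun res tsp => res ++ [tp ++ " " ++ tsp]) acc = acc ++ ys.map (fun b => tp ++ " " ++ b) := by
  induction ys generalizing acc with
  | nil => simp
  | cons y ys ih => simp [List.foldl, ih]

theorem pvProd_foldl (xs ys : List String) (acc : List String) :
    xs.foldl (fun res tp => ys.foldl (fun res tsp => res ++ [tp ++ " " ++ tsp]) res) acc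
      = acc ++ pvProd xs ys := by
  induction xs generalizing acc with
  | nil => simp [pvProd]
  | cons x xs ih =>
      rw [List.foldl_cons, pvProd_inner, ih]
      simp [pvProd]

theorem pvProd_assoc (x y z : List String) : pvProd (pvProd x y) z = pvProd x (pvProd y z) := by
  simp only [pvProd, List.flatMap_assoc, List.flatMap_map, List.map_flatMap, List.map_map,
    Function.comp_def, String.append_assoc]

theorem pvProd_foldl_assoc (props : List (List String)) (L : List Int) (x y : List String) :
    L.foldl (fun result i =>
        result.flatMap (fun a => ((PySem.List.pyGet? props i).getD []).map (fun b => a ++ " " ++ b)))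
      (pvProd x y)
      = pvProd x (L.foldl (fun result i =>
          result.flatMap (fun a => ((PySem.List.pyGet? props i).getD []).map (fun b => a ++ " " ++ b))) y) := by
  induction L generalizing y with
  | nil => rfl
  | cons i L ih =>
      show L.foldl _ (pvProd (pvProd x y) _) = _
      rw [show (pvProd (pvProd x y) ((PySem.List.pyGet? props i).getD []))
            = pvProd x (pvProd y ((PySem.List.pyGet? props i).getD [])) from pvProd_assoc ..]
      exact ih _

theorem pv_go_eq_alt (props : List (List String)) (fuel : Nat) :
    ∀ length : Int, fuel = ((props.length : Int) - length).toNat →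
      get_sentences_after_go props fuel length = get_sentences_after_alt props length := by
  induction fuel with
  | zero =>
      intro length h
      by_cases heq : length = (props.length : Int)
      · subst heq
        simp [get_sentences_after_go, get_sentences_after_alt,
          PySem.List.pyRange_one_eq_nil (le_refl _)]
      · have hgt : (props.length : Int) < length := by omega
        have hget : PySem.List.pyGet? props (length - 1) = none := by
          rw [PySem.List.pyGet?_eq_none_iff]
          simp [PySem.Raise.InRange]
          omega
        simp [get_sentences_after_go, get_sentences_after_alt, heq, hget,
          PySem.List.pyRange_one_eq_nil (le_of_lt hgt)]
  | succ fuel ih =>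
      intro length h
      have hlt : length < (props.length : Int) := by omega
      have heq : length ≠ (props.length : Int) := by omega
      have hrec := ih (length + 1) (by omega)
      have hsplit : get_sentences_after_alt props length
          = pvProd ((PySem.List.pyGet? props (length - 1)).getD [])
              (get_sentences_after_alt props (length + 1)) := by
        unfold get_sentences_after_alt
        rw [PySem.List.pyRange_one_cons hlt, List.foldl_cons,
          show length + 1 - 1 = length from by omega]
        exact pvProd_foldl_assoc props _ _ _
      simp only [get_sentences_after_go, if_neg heq]
      rw [pvProd_foldl, List.nil_append, hrec, hsplit]

-- ===== VERDICT (by name: the statement is the Claim_ definition above) =====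
theorem get_sentences_after_spec : Claim_equal_get_sentences_after := by
  intro props length _ _
  unfold Spec_get_sentences_after get_sentences_after
  exact (pv_go_eq_alt props _ length rfl).symm ▸ rfl
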